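-- pv_equiv track=rewrite | github.com/Iacob-Alexandru-Andrei/nested_cloze_generator | src/nested_clz_generator/check_clozes.py | parse_note_blocks
-- ===== SOURCE A (Python) =====
-- def parse_note_blocks(lines):
--     """
--     Generator function that yields (note_id, before_text, after_text).
--     We expect each block to look like:
--
--     Note ID: <number>
--       Field: <some field>
--
--     Before:
--       <some lines>
--
--     After:
--       <some lines>
--
--     (blank lines in between)
--     """
--     note_id = None
--     before_text = []
--     after_text = []
--
--     reading_before = False
--     reading_after = False
--
--     i = 0
--     while i < len(lines):
--         line = lines[i].rstrip("\n")
--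
--         # Detect "Note ID: <number>"
--         if line.startswith("Note ID: "):
--             # If we already had a block in progress, yield it
--             if note_id is not None:
--                 yield (note_id, "\n".join(before_text), "\n".join(after_text))
--
--             # Start a new block
--             note_id = line.split("Note ID: ", 1)[1].strip()
--             before_text = []
--             after_text = []
--             reading_before = False
--             reading_after = False
--             i += 1
--             continue
--
--         # Detect "Before:"
--         if line.strip() == "Before:":
--             reading_before = True
--             reading_after = False
--             i += 1
--             continue
--
--         # Detect "After:"
--         if line.strip() == "After:":
--             reading_before = False
--             reading_after = True
--             i += 1
--             continue
--
--         # If we're reading the 'Before' text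
--         if reading_before:
--             before_text.append(line)
--
--         # If we're reading the 'After' text
--         elif reading_after:
--             after_text.append(line)
--
--         i += 1
--
--     # End of file => yield the last block if any
--     if note_id is not None:
--         yield (note_id, "\n".join(before_text), "\n".join(after_text))
-- ===== SOURCE B (Python) =====
-- def parse_note_blocks(lines):
--     """Two-pass rewrite: first partition `lines` into (note_id, body) blocks,
--     then route each block's body lines to before/after via one current target."""
--     blocks = []
--     for raw in lines:
--         line = raw.rstrip("\n")
--         if line.startswith("Note ID: "):
--             blocks.append((line.split("Note ID: ", 1)[1].strip(), []))
--         elif blocks: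
--             blocks[-1][1].append(line)
--     for note_id, body in blocks:
--         before, after = [], []
--         target = None
--         for line in body:
--             s = line.strip()
--             if s == "Before:":
--                 target = before
--             elif s == "After:":
--                 target = after
--             elif target is not None:
--                 target.append(line)
--         yield (note_id, "\n".join(before), "\n".join(after))
-- ===== Notes on version B (the rewrite author's own statement) =====
-- stated objective: alternative
-- what changed: Replaced the single while-loop six-variable state machine by a two-pass decomposition: pass one partitions the lines into (note_id, body) blocks dropping the preamble, pass two routes each block's body lines to before/after via one current-target list reference.
import Mathlib
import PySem

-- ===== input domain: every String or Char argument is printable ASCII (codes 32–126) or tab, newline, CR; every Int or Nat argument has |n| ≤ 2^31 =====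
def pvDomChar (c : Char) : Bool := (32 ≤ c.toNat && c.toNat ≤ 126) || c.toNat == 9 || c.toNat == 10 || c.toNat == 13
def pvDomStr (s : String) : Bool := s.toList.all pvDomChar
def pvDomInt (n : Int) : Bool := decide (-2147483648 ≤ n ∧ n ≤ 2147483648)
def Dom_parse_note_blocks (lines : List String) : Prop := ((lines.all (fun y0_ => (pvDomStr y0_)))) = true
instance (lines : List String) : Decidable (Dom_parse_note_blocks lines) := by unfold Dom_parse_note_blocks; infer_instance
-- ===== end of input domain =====

-- B replaces A's single while-loop six-variable state machine by a two-pass decomposition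
-- (partition into (note_id, body) blocks, then route each body to before/after); same cost,
-- no speed claim. Equivalence is about the returned (materialised) generator values.

-- shared helpers for the identical Python expressions in both sources
-- raw.rstrip("\n"): hand port (PySem has no right-strip with an explicit char set); exact:
-- removes every trailing '\n'.
def pvRstripNL (s : String) : String :=
  String.ofList ((s.toList.reverse.dropWhile (fun c => c == '\n')).reverse)

def pvIsNote (line : String) : Bool := PySem.Str.startswith line "Note ID: "

-- line.split("Note ID: ", 1)[1].strip(); the [1] is only evaluated under the startswith
-- guard in both programs, where the piece exists, so the .getD defaults are unreachable.
def pvNoteId (line : String) : String :=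
  PySem.Str.strip (((PySem.Str.splitMax? line "Note ID: " 1).getD []).getD 1 "")

-- ===== PORT A =====
def parseA_loop (ls : List String) (note_id : Option String)
    (before_text after_text : List String)
    (reading_before reading_after : Bool) : List (String × String × String) :=
  match ls with
  | [] =>
    match note_id with
    | none => []
    | some nid => [(nid, PySem.Str.join "\n" before_text, PySem.Str.join "\n" after_text)]
  | raw :: rest =>
    let line := pvRstripNL raw
    if pvIsNote line then
      (match note_id with
       | none => ([] : List (String × String × String))
       | some nid => [(nid, PySem.Str.join "\n" before_text, PySem.Str.join "\n" after_text)]) ++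
      parseA_loop rest (some (pvNoteId line)) [] [] false false
    else if PySem.Str.strip line == "Before:" then
      parseA_loop rest note_id before_text after_text true false
    else if PySem.Str.strip line == "After:" then
      parseA_loop rest note_id before_text after_text false true
    else if reading_before then
      parseA_loop rest note_id (before_text ++ [line]) after_text reading_before reading_after
    else if reading_after then
      parseA_loop rest note_id before_text (after_text ++ [line]) reading_before reading_after
    else
      parseA_loop rest note_id before_text after_text reading_before reading_after

def parse_note_blocks (lines : List String) : List (String × String × String) :=
  parseA_loop lines none [] [] false false

-- ===== PORT B =====
-- pass 1: partition into (note_id, body) blocks; the body of a block is the run of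
-- rstripped lines up to the next "Note ID: " line (preamble lines are dropped).
def pvTakeBody : List String → List String
  | [] => []
  | raw :: rest =>
    let line := pvRstripNL raw
    if pvIsNote line then [] else line :: pvTakeBody rest

def pvDropBody : List String → List String
  | [] => []
  | raw :: rest => if pvIsNote (pvRstripNL raw) then raw :: rest else pvDropBody rest

theorem pvDropBody_length_le : ∀ ls : List String, (pvDropBody ls).length ≤ ls.length := by
  intro ls
  induction ls with
  | nil => simp [pvDropBody]
  | cons raw rest ih =>
    by_cases h : pvIsNote (pvRstripNL raw) = true
    · simp [pvDropBody, h]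
    · simp only [pvDropBody, if_neg h, List.length_cons]
      omega

def pvBlocks : List String → List (String × List String)
  | [] => []
  | raw :: rest =>
    let line := pvRstripNL raw
    if pvIsNote line then (pvNoteId line, pvTakeBody rest) :: pvBlocks (pvDropBody rest)
    else pvBlocks rest
termination_by ls => ls.length
decreasing_by
  · exact Nat.lt_succ_of_le (pvDropBody_length_le rest)
  · simp

-- pass 2: one current target (some true = before, some false = after, none = neither)
def pvRoute : List String → Option Bool → List String → List String → List String × List String
  | [], _, before, after => (before, after)
  | line :: body, target, before, after =>
    let s := PySem.Str.strip line
    if s == "Before:" then pvRoute body (some true) before after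
    else if s == "After:" then pvRoute body (some false) before after
    else
      match target with
      | some true => pvRoute body target (before ++ [line]) after
      | some false => pvRoute body target before (after ++ [line])
      | none => pvRoute body target before after

def pvEmit (b : String × List String) : String × String × String :=
  let r := pvRoute b.2 none [] []
  (b.1, PySem.Str.join "\n" r.1, PySem.Str.join "\n" r.2)

def parse_note_blocks_alt (lines : List String) : List (String × String × String) :=
  (pvBlocks lines).map pvEmit

-- ===== PRECONDITION & SPEC =====
def Spec_parse_note_blocks (lines : List String) (out : List (String × String × String)) : Prop := out = parse_note_blocks_alt lines
instance (lines : List String) (out : List (String × String × String)) : Decidable (Spec_parse_note_blocks lines out) := by unfold Spec_parse_note_blocks; infer_instance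

-- ===== CLAIM (what is proved, stated in full; the proofs are below) =====
def Claim_equal_parse_note_blocks : Prop := ∀ (lines : List String), Dom_parse_note_blocks lines → Spec_parse_note_blocks lines (parse_note_blocks lines)

-- ===== LEMMAS AND PROOFS =====

-- A's pair of flags, read in A's branch order, as B's single current target
def pvMode (rb ra : Bool) : Option Bool :=
  if rb then some true else if ra then some false else none

-- Invariant of A's loop while a block is open (note_id = some id): it finishes the current
-- block exactly as pvRoute does on the remaining body, then processes the rest as B's blocks.
theorem parseA_loop_some : ∀ (n : Nat) (ls : List String), ls.length ≤ n →
    ∀ (id : String) (bt att : List String) (rb ra : Bool),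
    parseA_loop ls (some id) bt att rb ra =
      (id, PySem.Str.join "\n" (pvRoute (pvTakeBody ls) (pvMode rb ra) bt att).1,
           PySem.Str.join "\n" (pvRoute (pvTakeBody ls) (pvMode rb ra) bt att).2)
      :: (pvBlocks (pvDropBody ls)).map pvEmit := by
  intro n
  induction n with
  | zero =>
    intro ls hls id bt att rb ra
    have : ls = [] := List.length_eq_zero_iff.mp (Nat.le_zero.mp hls)
    subst this
    simp [parseA_loop, pvTakeBody, pvDropBody, pvRoute, pvBlocks]
  | succ n ih =>
    intro ls hls id bt att rb ra
    cases ls with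
    | nil => simp [parseA_loop, pvTakeBody, pvDropBody, pvRoute, pvBlocks]
    | cons raw rest =>
      have hrest : rest.length ≤ n := by
        simpa using Nat.lt_succ_iff.mp (Nat.lt_of_lt_of_le (by simp) hls)
      by_cases h1 : pvIsNote (pvRstripNL raw) = true
      · rw [show parseA_loop (raw :: rest) (some id) bt att rb ra =
            [(id, PySem.Str.join "\n" bt, PySem.Str.join "\n" att)] ++
              parseA_loop rest (some (pvNoteId (pvRstripNL raw))) [] [] false false from by
            simp [parseA_loop, h1]]
        rw [ih rest hrest (pvNoteId (pvRstripNL raw)) [] [] false false]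
        simp [pvTakeBody, pvDropBody, pvBlocks, h1, pvRoute, pvEmit, pvMode]
      · have hT : pvTakeBody (raw :: rest) = pvRstripNL raw :: pvTakeBody rest := by
          simp [pvTakeBody, h1]
        have hD : pvDropBody (raw :: rest) = pvDropBody rest := by
          simp [pvDropBody, h1]
        by_cases h2 : PySem.Str.strip (pvRstripNL raw) == "Before:"
        · rw [show parseA_loop (raw :: rest) (some id) bt att rb ra =
              parseA_loop rest (some id) bt att true false from by
              simp [parseA_loop, h1, h2]]
          rw [ih rest hrest id bt att true false, hT, hD]
          simp [pvRoute, h2, pvMode]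
        · by_cases h3 : PySem.Str.strip (pvRstripNL raw) == "After:"
          · rw [show parseA_loop (raw :: rest) (some id) bt att rb ra =
                parseA_loop rest (some id) bt att false true from by
                simp [parseA_loop, h1, h2, h3]]
            rw [ih rest hrest id bt att false true, hT, hD]
            simp [pvRoute, h2, h3, pvMode]
          · have hR : pvRoute (pvRstripNL raw :: pvTakeBody rest) (pvMode rb ra) bt att =
                match pvMode rb ra with
                | some true => pvRoute (pvTakeBody rest) (pvMode rb ra) (bt ++ [pvRstripNL raw]) att
                | some false => pvRoute (pvTakeBody rest) (pvMode rb ra) bt (att ++ [pvRstripNL raw])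
                | none => pvRoute (pvTakeBody rest) (pvMode rb ra) bt att := by
              simp [pvRoute, h2, h3]
            cases rb with
            | true =>
              rw [show parseA_loop (raw :: rest) (some id) bt att true ra =
                  parseA_loop rest (some id) (bt ++ [pvRstripNL raw]) att true ra from by
                  simp [parseA_loop, h1, h2, h3]]
              rw [ih rest hrest id (bt ++ [pvRstripNL raw]) att true ra, hT, hD, hR]
              simp [pvMode]
            | false =>
              cases ra with
              | true =>
                rw [show parseA_loop (raw :: rest) (some id) bt att false true =
                    parseA_loop rest (some id) bt (att ++ [pvRstripNL raw]) false true from by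
                    simp [parseA_loop, h1, h2, h3]]
                rw [ih rest hrest id bt (att ++ [pvRstripNL raw]) false true, hT, hD, hR]
                simp [pvMode]
              | false =>
                rw [show parseA_loop (raw :: rest) (some id) bt att false false =
                    parseA_loop rest (some id) bt att false false from by
                    simp [parseA_loop, h1, h2, h3]]
                rw [ih rest hrest id bt att false false, hT, hD, hR]
                simp [pvMode]

-- Before the first "Note ID: " line A accumulates state that is discarded: its output
-- is B's block list of the whole input.
theorem parseA_loop_none : ∀ (ls : List String) (bt att : List String) (rb ra : Bool),
    parseA_loop ls none bt att rb ra = (pvBlocks ls).map pvEmit := by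
  intro ls
  induction ls with
  | nil => intro bt att rb ra; simp [parseA_loop, pvBlocks]
  | cons raw rest ih =>
    intro bt att rb ra
    by_cases h1 : pvIsNote (pvRstripNL raw) = true
    · rw [show parseA_loop (raw :: rest) none bt att rb ra =
          parseA_loop rest (some (pvNoteId (pvRstripNL raw))) [] [] false false from by
          simp [parseA_loop, h1]]
      rw [parseA_loop_some rest.length rest le_rfl (pvNoteId (pvRstripNL raw)) [] [] false false]
      simp [pvBlocks, h1, pvEmit, pvMode]
    · have hB : pvBlocks (raw :: rest) = pvBlocks rest := by
        simp [pvBlocks, h1]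
      rw [hB]
      by_cases h2 : PySem.Str.strip (pvRstripNL raw) == "Before:"
      · rw [show parseA_loop (raw :: rest) none bt att rb ra =
            parseA_loop rest none bt att true false from by simp [parseA_loop, h1, h2]]
        exact ih bt att true false
      · by_cases h3 : PySem.Str.strip (pvRstripNL raw) == "After:"
        · rw [show parseA_loop (raw :: rest) none bt att rb ra =
              parseA_loop rest none bt att false true from by simp [parseA_loop, h1, h2, h3]]
          exact ih bt att false true
        · cases rb with
          | true =>
            rw [show parseA_loop (raw :: rest) none bt att true ra =
                parseA_loop rest none (bt ++ [pvRstripNL raw]) att true ra from by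
                simp [parseA_loop, h1, h2, h3]]
            exact ih _ att true ra
          | false =>
            cases ra with
            | true =>
              rw [show parseA_loop (raw :: rest) none bt att false true =
                  parseA_loop rest none bt (att ++ [pvRstripNL raw]) false true from by
                  simp [parseA_loop, h1, h2, h3]]
              exact ih bt _ false true
            | false =>
              rw [show parseA_loop (raw :: rest) none bt att false false =
                  parseA_loop rest none bt att false false from by
                  simp [parseA_loop, h1, h2, h3]]
              exact ih bt att false false

-- ===== VERDICT (by name: the statement is the Claim_ definition above) =====
theorem parse_note_blocks_spec : Claim_equal_parse_note_blocks := by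
  intro lines _
  unfold Spec_parse_note_blocks parse_note_blocks parse_note_blocks_alt
  exact parseA_loop_none lines [] [] false false
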